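-- pv_equiv track=rewrite | github.com/shohoku11wrj/haoqiyou | update_webpage_events.py | _determine_gps
-- ===== SOURCE A (Python) =====
-- DEFAULT_MEET_GPS = "37.42797, -122.14508"
--
-- KNOWN_LOCATIONS = {
--     "summit bicycles": DEFAULT_MEET_GPS,
--     "392 california ave": DEFAULT_MEET_GPS,
-- }
--
-- def _determine_gps(location: str, provided: str) -> str:
--     if provided:
--         return provided
--     if not location:
--         return DEFAULT_MEET_GPS
--     lower_loc = location.lower()
--     for key, coords in KNOWN_LOCATIONS.items():
--         if key in lower_loc:
--             return coords
--     return DEFAULT_MEET_GPS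
-- ===== SOURCE B (Python) =====
-- DEFAULT_MEET_GPS = "37.42797, -122.14508"
--
-- def _determine_gps(location: str, provided: str) -> str:
--     # Every KNOWN_LOCATIONS value equals DEFAULT_MEET_GPS and so does the
--     # fallback, so once `provided` is falsy the answer is always the default.
--     return provided or DEFAULT_MEET_GPS
-- ===== Notes on version B (the rewrite author's own statement) =====
-- stated objective: simpler
-- what changed: Replaced the lowercase-and-scan over KNOWN_LOCATIONS with the closed form 'provided or DEFAULT_MEET_GPS', valid because every known-location value equals the default fallback.
import Mathlib
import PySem

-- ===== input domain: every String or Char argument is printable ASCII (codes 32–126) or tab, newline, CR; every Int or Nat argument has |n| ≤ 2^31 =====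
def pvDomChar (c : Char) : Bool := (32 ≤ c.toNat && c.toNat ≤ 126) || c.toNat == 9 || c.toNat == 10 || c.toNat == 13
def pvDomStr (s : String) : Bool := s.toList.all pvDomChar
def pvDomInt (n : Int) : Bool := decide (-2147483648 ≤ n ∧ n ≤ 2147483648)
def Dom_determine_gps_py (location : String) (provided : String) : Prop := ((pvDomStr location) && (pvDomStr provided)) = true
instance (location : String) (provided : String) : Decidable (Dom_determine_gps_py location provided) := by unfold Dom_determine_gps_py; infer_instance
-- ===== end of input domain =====

-- B replaces A's lowercase-and-scan over KNOWN_LOCATIONS with the closed form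
-- 'provided or DEFAULT_MEET_GPS' (every known-location value equals the default): simpler.


-- ===== PORT A =====
def DEFAULT_MEET_GPS : String := "37.42797, -122.14508"

def KNOWN_LOCATIONS : List (String × String) :=
  [("summit bicycles", DEFAULT_MEET_GPS), ("392 california ave", DEFAULT_MEET_GPS)]

-- the 'for key, coords in KNOWN_LOCATIONS.items()' loop with early return
def scanKnown : List (String × String) → String → Option String
  | [], _ => none
  | (key, coords) :: rest, lowerLoc =>
      if PySem.Str.isIn key lowerLoc then some coords else scanKnown rest lowerLoc

def determine_gps_py (location : String) (provided : String) : String :=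
  if provided ≠ "" then provided
  else if location = "" then DEFAULT_MEET_GPS
  else
    let lower_loc := PySem.Str.lower location
    match scanKnown KNOWN_LOCATIONS lower_loc with
    | some coords => coords
    | none => DEFAULT_MEET_GPS

-- ===== PORT B =====
def determine_gps_py_alt (_location : String) (provided : String) : String :=
  if provided = "" then DEFAULT_MEET_GPS else provided

-- ===== PRECONDITION & SPEC =====
def Spec_determine_gps_py (location : String) (provided : String) (out : String) : Prop := out = determine_gps_py_alt location provided
instance (location : String) (provided : String) (out : String) : Decidable (Spec_determine_gps_py location provided out) := by unfold Spec_determine_gps_py; infer_instance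

-- ===== CLAIM (what is proved, stated in full; the proofs are below) =====
def Claim_equal_determine_gps_py : Prop := ∀ (location : String) (provided : String), Dom_determine_gps_py location provided → Spec_determine_gps_py location provided (determine_gps_py location provided)

-- ===== LEMMAS AND PROOFS =====

-- every value in KNOWN_LOCATIONS is DEFAULT_MEET_GPS, so the scan can only yield the default
theorem scanKnown_known (loc : String) :
    ∀ r, scanKnown KNOWN_LOCATIONS loc = some r → r = DEFAULT_MEET_GPS := by
  intro r h
  simp only [KNOWN_LOCATIONS, scanKnown] at h
  split_ifs at h <;> simp_all

-- ===== VERDICT (by name: the statement is the Claim_ definition above) =====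
theorem determine_gps_py_spec : Claim_equal_determine_gps_py := by
  intro location provided _
  unfold Spec_determine_gps_py determine_gps_py determine_gps_py_alt
  by_cases hp : provided = ""
  · simp only [hp, ne_eq, not_true_eq_false, if_false, if_true]
    split
    · rfl
    · cases hscan : scanKnown KNOWN_LOCATIONS (PySem.Str.lower location) with
      | none => rfl
      | some r => simpa [hscan] using scanKnown_known _ r hscan
  · simp [hp]
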